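-- pv_equiv track=rewrite | github.com/JamesLeberknight/footbag-results | tools/53_rebuild_pbp_from_stage2.py | has_stage2_duplicates
-- ===== SOURCE A (Python) =====
-- def has_stage2_duplicates(placements: list[dict], divisions: set[str]) -> bool:
--     """Return True if stage2 has any (div, place) duplicates in the given divisions."""
--     seen: set = set()
--     for p in placements:
--         div = p["division_canon"]
--         if div not in divisions:
--             continue
--         key = (div, str(p["place"]))
--         if key in seen:
--             return True
--         seen.add(key)
--     return False
-- ===== SOURCE B (Python) =====
-- def has_stage2_duplicates(placements: list[dict], divisions: set[str]) -> bool: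
--     """Return True if stage2 has any (div, place) duplicates in the given divisions."""
--     keys = sorted((div, str(p["place"])) for p in placements
--                   if (div := p["division_canon"]) in divisions)
--     return any(a == b for a, b in zip(keys, keys[1:]))
-- ===== Notes on version B (the rewrite author's own statement) =====
-- stated objective: alternative
-- what changed: Replaces the stateful seen-set loop with early return by three stages with no hash set at all: collect the filtered (div, str(place)) keys, sort them, and scan adjacent pairs for an equal neighbour.
import Mathlib
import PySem

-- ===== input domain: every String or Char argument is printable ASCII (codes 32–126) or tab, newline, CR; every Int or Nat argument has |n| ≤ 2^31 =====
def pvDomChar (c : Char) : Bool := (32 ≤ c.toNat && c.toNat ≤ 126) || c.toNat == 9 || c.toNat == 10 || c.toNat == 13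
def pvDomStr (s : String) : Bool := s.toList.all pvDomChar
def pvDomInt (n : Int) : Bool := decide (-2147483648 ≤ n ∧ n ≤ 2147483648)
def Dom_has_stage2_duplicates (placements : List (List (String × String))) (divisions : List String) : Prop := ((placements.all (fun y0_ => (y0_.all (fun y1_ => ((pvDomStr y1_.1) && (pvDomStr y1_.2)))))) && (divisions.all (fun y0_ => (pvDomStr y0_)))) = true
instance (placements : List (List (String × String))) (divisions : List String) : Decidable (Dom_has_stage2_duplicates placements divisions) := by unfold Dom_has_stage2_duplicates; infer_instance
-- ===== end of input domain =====

-- B replaces A's online seen-set loop with early return by three stages with no set at all: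
-- collect the filtered (div, place) keys, sort them, scan adjacent pairs for an equal neighbour
-- (objective: alternative decomposition, same result).

-- ===== PORT A =====
-- the for-loop with 'seen', 'continue' and early 'return True', step for step
def hasS2DupA_go (divisions : List String) (seen : PySem.Set (String × String)) :
    List (List (String × String)) → Bool
  | [] => false
  | p :: rest =>
    match (PySem.Dict.mk p).get? "division_canon" with
    | none => false  -- KeyError in Python (excluded by Pre_)
    | some div =>
      if !(PySem.Set.contains divisions div) then hasS2DupA_go divisions seen rest
      else
        match (PySem.Dict.mk p).get? "place" with
        | none => false  -- KeyError in Python (excluded by Pre_)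
        | some pl =>
          if PySem.Set.contains seen (div, pl) then true
          else hasS2DupA_go divisions (PySem.Set.add seen (div, pl)) rest

def has_stage2_duplicates (placements : List (List (String × String))) (divisions : List String) : Bool :=
  hasS2DupA_go divisions PySem.Set.empty placements

-- ===== PORT B =====
-- the generator: (div, str(p["place"])) for p in placements if (div := p["division_canon"]) in divisions
-- (str on a value that is already a string is the identity)
def hasS2DupKeys (divisions : List String) (placements : List (List (String × String))) :
    List (String × String) :=
  placements.filterMap (fun p =>
    ((PySem.Dict.mk p).get? "division_canon").bind (fun div =>
      if PySem.Set.contains divisions div then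
        ((PySem.Dict.mk p).get? "place").map (fun pl => (div, pl))
      else none))

-- keys = sorted(...): Python sorts string pairs lexicographically = the Prod.Lex order on String × String;
-- any(a == b for a, b in zip(keys, keys[1:])): keys[1:] is keys.tail
def has_stage2_duplicates_alt (placements : List (List (String × String))) (divisions : List String) : Bool :=
  let keys := PySem.List.sorted (hasS2DupKeys divisions placements)
      (fun k => (toLex k : String ×ₗ String)) false
  (keys.zip keys.tail).any (fun ab => ab.1 == ab.2)

-- ===== PRECONDITION & SPEC =====
-- Pre_ excludes placements with a dict missing "division_canon", or missing "place" while its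
-- division is in divisions: B raises KeyError there, and A returns a value only when a duplicate
-- happens to occur before the malformed entry (an accident of its early return).
def Pre_has_stage2_duplicates (placements : List (List (String × String))) (divisions : List String) : Prop :=
  ∀ p ∈ placements,
    (((PySem.Dict.mk p).get? "division_canon").isSome &&
     ((PySem.Dict.mk p).get? "division_canon").all (fun div =>
        !(PySem.Set.contains divisions div) || ((PySem.Dict.mk p).get? "place").isSome)) = true
instance (placements : List (List (String × String))) (divisions : List String) : Decidable (Pre_has_stage2_duplicates placements divisions) := by unfold Pre_has_stage2_duplicates; infer_instance

def pvWitness_has_stage2_duplicates : (List (List (String × String))) × List String :=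
  ([[("division_canon", "open"), ("place", "1")], [("division_canon", "open"), ("place", "1")]], ["open"])

def Spec_has_stage2_duplicates (placements : List (List (String × String))) (divisions : List String) (out : Bool) : Prop := out = has_stage2_duplicates_alt placements divisions
instance (placements : List (List (String × String))) (divisions : List String) (out : Bool) : Decidable (Spec_has_stage2_duplicates placements divisions out) := by unfold Spec_has_stage2_duplicates; infer_instance

-- ===== CLAIM (what is proved, stated in full; the proofs are below) =====
def Claim_equal_has_stage2_duplicates : Prop := ∀ (placements : List (List (String × String))) (divisions : List String), Dom_has_stage2_duplicates placements divisions → Pre_has_stage2_duplicates placements divisions → Spec_has_stage2_duplicates placements divisions (has_stage2_duplicates placements divisions)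

-- ===== LEMMAS AND PROOFS =====

-- the per-element precondition
def pvPreElem (divisions : List String) (p : List (String × String)) : Prop :=
  (((PySem.Dict.mk p).get? "division_canon").isSome &&
   ((PySem.Dict.mk p).get? "division_canon").all (fun div =>
      !(PySem.Set.contains divisions div) || ((PySem.Dict.mk p).get? "place").isSome)) = true

theorem keys_cons_skip (divisions : List String) (p : List (String × String)) (rest : List (List (String × String)))
    (div : String) (hget : (PySem.Dict.mk p).get? "division_canon" = some div)
    (hmem : PySem.Set.contains divisions div = false) :
    hasS2DupKeys divisions (p :: rest) = hasS2DupKeys divisions rest := by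
  have : div ∉ divisions := by simpa [PySem.Set.contains_eq_listContains] using hmem
  simp [hasS2DupKeys, hget, this]

theorem keys_cons_take (divisions : List String) (p : List (String × String)) (rest : List (List (String × String)))
    (div pl : String) (hget : (PySem.Dict.mk p).get? "division_canon" = some div)
    (hmem : PySem.Set.contains divisions div = true)
    (hgpl : (PySem.Dict.mk p).get? "place" = some pl) :
    hasS2DupKeys divisions (p :: rest) = (div, pl) :: hasS2DupKeys divisions rest := by
  have : div ∈ divisions := by simpa [PySem.Set.contains_eq_listContains] using hmem
  simp [hasS2DupKeys, hget, hgpl, this]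

-- A's loop, with arbitrary seen set, decides non-nodup-ness of seen ++ keys
theorem hasS2DupA_go_eq (divisions : List String) :
    ∀ (ps : List (List (String × String))) (seen : PySem.Set (String × String)),
      seen.Nodup → (∀ p ∈ ps, pvPreElem divisions p) →
      hasS2DupA_go divisions seen ps = decide (¬ (seen ++ hasS2DupKeys divisions ps).Nodup) := by
  intro ps
  induction ps with
  | nil => intro seen hn _; simp [hasS2DupA_go, hasS2DupKeys, hn]
  | cons p rest ih =>
    intro seen hn hpre
    have hp := hpre p (by simp)
    unfold pvPreElem at hp
    simp only [Bool.and_eq_true] at hp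
    obtain ⟨hdiv, hall⟩ := hp
    obtain ⟨div, hget⟩ := Option.isSome_iff_exists.mp hdiv
    have hrest : ∀ q ∈ rest, pvPreElem divisions q := fun q hq => hpre q (by simp [hq])
    by_cases hmem : PySem.Set.contains divisions div = true
    · have hpl : ((PySem.Dict.mk p).get? "place").isSome = true := by
        rw [hget] at hall
        simp only [Option.all_some] at hall
        rcases Bool.or_eq_true_iff.mp hall with h | h
        · rw [hmem] at h; simp at h
        · exact h
      obtain ⟨pl, hgpl⟩ := Option.isSome_iff_exists.mp hpl
      rw [keys_cons_take divisions p rest div pl hget hmem hgpl]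
      unfold hasS2DupA_go
      rw [hget, hgpl]
      simp only [hmem, Bool.not_true, Bool.false_eq_true, if_false]
      by_cases hseen : PySem.Set.contains seen (div, pl) = true
      · have hin : (div, pl) ∈ seen := by
          simpa [PySem.Set.contains_eq_listContains] using hseen
        simp only [hseen, if_true]
        have hnd : ¬ (seen ++ (div, pl) :: hasS2DupKeys divisions rest).Nodup := by
          rw [List.nodup_append]
          intro ⟨_, _, hdisj⟩
          exact hdisj _ hin _ (by simp) rfl
        simp [hnd]
      · have hnin : (div, pl) ∉ seen := by
          simpa [PySem.Set.contains_eq_listContains] using hseen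
        simp only [hseen, Bool.false_eq_true, if_false]
        rw [ih (PySem.Set.add seen (div, pl)) (PySem.Set.nodup_add _ _ hn) hrest]
        have hadd : PySem.Set.add seen (div, pl) = seen ++ [(div, pl)] := by
          simp [PySem.Set.add, hnin]
        rw [hadd, List.append_assoc, List.singleton_append]
    · rw [keys_cons_skip divisions p rest div hget (by simpa using hmem)]
      unfold hasS2DupA_go
      rw [hget]
      simp only [hmem, Bool.not_false, if_true]
      exact ih seen hn hrest

-- an adjacent equal pair means the list has a duplicate
theorem adjAny_true_not_nodup {α : Type} [BEq α] [LawfulBEq α] :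
    ∀ (l : List α), (l.zip l.tail).any (fun ab => ab.1 == ab.2) = true → ¬ l.Nodup := by
  intro l
  induction l with
  | nil => simp
  | cons a t ih =>
    cases t with
    | nil => simp
    | cons b t2 =>
      simp only [List.tail_cons, List.zip_cons_cons, List.any_cons, Bool.or_eq_true, beq_iff_eq]
      intro h hnd
      rcases h with h | h
      · exact (List.nodup_cons.mp hnd).1 (h ▸ List.mem_cons_self)
      · exact ih (by simpa using h) (List.nodup_cons.mp hnd).2

-- a ≤-sorted list (under an injective key into a linear order) with no adjacent equal pair has no duplicate
theorem adjAny_false_nodup {α γ : Type} [BEq α] [LawfulBEq α] [LinearOrder γ] (f : α → γ)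
    (hinj : Function.Injective f) :
    ∀ (l : List α), l.Pairwise (fun a b => f a ≤ f b) →
      (l.zip l.tail).any (fun ab => ab.1 == ab.2) = false → l.Nodup := by
  intro l
  induction l with
  | nil => simp
  | cons a t ih =>
    cases t with
    | nil => simp
    | cons b t2 =>
      intro hp h
      simp only [List.tail_cons, List.zip_cons_cons, List.any_cons, Bool.or_eq_false_iff,
        beq_eq_false_iff_ne, ne_eq] at h
      obtain ⟨hab, hrest⟩ := h
      have hpt := List.pairwise_cons.mp hp
      have hlt : f a < f b := lt_of_le_of_ne (hpt.1 b List.mem_cons_self)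
        (fun he => hab (hinj he))
      have hnt : (b :: t2).Nodup := ih hpt.2 (by simpa using hrest)
      refine List.nodup_cons.mpr ⟨?_, hnt⟩
      intro hmem
      rcases List.mem_cons.mp hmem with he | hm
      · exact hab he
      · -- a ∈ t2: then f b ≤ f a (sortedness), contradicting f a < f b
        have hbc := (List.pairwise_cons.mp hpt.2).1 _ hm
        exact lt_irrefl _ (lt_of_lt_of_le hlt hbc)

-- B decides non-nodup-ness of the key list
theorem hasB_eq (placements : List (List (String × String))) (divisions : List String) :
    has_stage2_duplicates_alt placements divisions =
      decide (¬ (hasS2DupKeys divisions placements).Nodup) := by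
  unfold has_stage2_duplicates_alt
  set keys := hasS2DupKeys divisions placements with hk
  set s := PySem.List.sorted keys (fun k => (toLex k : String ×ₗ String)) false with hs
  have hperm : s.Perm keys := PySem.List.sorted_perm _ _ _
  have hinj : Function.Injective (fun k : String × String => (toLex k : String ×ₗ String)) :=
    fun _ _ h => h
  have hp : s.Pairwise (fun a b => (toLex a : String ×ₗ String) ≤ toLex b) :=
    PySem.List.sorted_pairwise _ _
  cases hany : (s.zip s.tail).any (fun ab => ab.1 == ab.2) with
  | true =>
    have := adjAny_true_not_nodup s hany
    have : ¬ keys.Nodup := fun hnd => this (hperm.nodup_iff.mpr hnd)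
    simp [this]
  | false =>
    have hnd : keys.Nodup := hperm.nodup_iff.mp (adjAny_false_nodup _ hinj s hp hany)
    simp [hnd]

-- ===== VERDICT (by name: the statement is the Claim_ definition above) =====
theorem has_stage2_duplicates_spec : Claim_equal_has_stage2_duplicates := by
  intro placements divisions _ hpre
  unfold Spec_has_stage2_duplicates has_stage2_duplicates
  rw [hasB_eq, hasS2DupA_go_eq divisions placements PySem.Set.empty List.nodup_nil hpre]
  simp [PySem.Set.empty]
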